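-- pv_equiv track=rewrite | github.com/lxx3f/sicp-learn | sicphw/hw03-Code/test.py | missing_digits
-- ===== SOURCE A (Python) =====
-- def missing_digits(n):
--     """Given a number a that is in sorted, increasing order,
--     return the number of missing digits in n. A missing digit is
--     a number between the first and last digit of a that is not in n.
--     >>> missing_digits(1248) # 3, 5, 6, 7
--     4
--     >>> missing_digits(1122) # No missing numbers
--     0
--     >>> missing_digits(123456) # No missing numbers
--     0
--     >>> missing_digits(3558) # 4, 6, 7
--     3
--     >>> missing_digits(4) # No missing numbers between 4 and 4
--     0
--     >>> from construct_check import check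
--     >>> # ban while or for loops
--     >>> check(HW_SOURCE_FILE, 'missing_digits', ['While', 'For'])
--     True
--     """
--     "*** YOUR CODE HERE ***"
--     if n < 10:
--         return 0
--     elif n % 10 - (n // 10) % 10 <= 1:
--         return  missing_digits(n // 10)
--     else:
--         return n % 10 - (n // 10) % 10 - 1 + missing_digits(n // 10)
-- ===== SOURCE B (Python) =====
-- def missing_digits(n):
--     if n < 10:
--         return 0
--     s = str(n)
--     return sum(max(0, ord(b) - ord(a) - 1) for a, b in zip(s, s[1:]))
-- ===== Notes on version B (the rewrite author's own statement) =====
-- stated objective: idiomatic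
-- what changed: Replaces the last-digit-peeling recursion on the number with a single forward pass over the decimal string's adjacent character pairs, summing max(0, ord(b)-ord(a)-1).
import Mathlib
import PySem

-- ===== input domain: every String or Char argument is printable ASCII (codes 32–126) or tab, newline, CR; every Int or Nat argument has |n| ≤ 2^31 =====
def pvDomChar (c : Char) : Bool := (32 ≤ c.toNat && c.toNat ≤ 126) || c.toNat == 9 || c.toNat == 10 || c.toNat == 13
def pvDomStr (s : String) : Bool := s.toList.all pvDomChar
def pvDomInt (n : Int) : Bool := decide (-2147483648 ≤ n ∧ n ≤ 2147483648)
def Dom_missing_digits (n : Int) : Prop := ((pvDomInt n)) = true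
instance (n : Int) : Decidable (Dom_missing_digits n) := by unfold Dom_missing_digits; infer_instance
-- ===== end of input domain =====

-- B replaces A's last-digit-peeling recursion with a single forward pass over the decimal
-- string's adjacent character pairs (same asymptotic cost; different decomposition).


-- termination helper for port A: n // 10 shrinks when n ≥ 10
theorem pv_fdiv_ten_lt (n : Int) (h : ¬ n < 10) : (PySem.Int.floordiv n 10).toNat < n.toNat := by
  obtain ⟨m, rfl⟩ := Int.eq_ofNat_of_zero_le (show (0:Int) ≤ n by omega)
  have e : PySem.Int.floordiv (m : Int) 10 = ((m / 10 : Nat) : Int) := by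
    unfold PySem.Int.floordiv; rw [Int.fdiv_eq_ediv]; simp
  rw [e]
  have hm : 10 ≤ m := by omega
  have hlt := Nat.div_lt_self (show 0 < m by omega) (show 1 < 10 by omega)
  simpa using hlt

-- ===== PORT A =====
def missing_digits (n : Int) : Int :=
  if n < 10 then 0
  else if PySem.Int.mod n 10 - PySem.Int.mod (PySem.Int.floordiv n 10) 10 ≤ 1 then
    missing_digits (PySem.Int.floordiv n 10)
  else
    PySem.Int.mod n 10 - PySem.Int.mod (PySem.Int.floordiv n 10) 10 - 1
      + missing_digits (PySem.Int.floordiv n 10)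
termination_by n.toNat
decreasing_by all_goals exact pv_fdiv_ten_lt n (by assumption)

-- ===== PORT B =====
-- s = str(n); sum(max(0, ord(b) - ord(a) - 1) for a, b in zip(s, s[1:]))
-- ord c → c.toNat (exact: str(n) for n ≥ 10 is ASCII digits); s[1:] → PySem.Chars.slice s 1 none
def missing_digits_alt (n : Int) : Int :=
  if n < 10 then 0
  else
    let s := PySem.Int.toChars n
    ((s.zip (PySem.Chars.slice s (some 1) none)).map
      (fun p => max 0 ((p.2.toNat : Int) - (p.1.toNat : Int) - 1))).sum

-- ===== PRECONDITION & SPEC =====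
def Spec_missing_digits (n : Int) (out : Int) : Prop := out = missing_digits_alt n
instance (n : Int) (out : Int) : Decidable (Spec_missing_digits n out) := by unfold Spec_missing_digits; infer_instance

-- ===== CLAIM (what is proved, stated in full; the proofs are below) =====
def Claim_equal_missing_digits : Prop := ∀ (n : Int), Dom_missing_digits n → Spec_missing_digits n (missing_digits n)

-- ===== LEMMAS AND PROOFS =====

theorem pv_fdiv_coe (m : Nat) : PySem.Int.floordiv (m : Int) 10 = ((m / 10 : Nat) : Int) := by
  unfold PySem.Int.floordiv; rw [Int.fdiv_eq_ediv]; simp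

theorem pv_fmod_coe (m : Nat) : PySem.Int.mod (m : Int) 10 = ((m % 10 : Nat) : Int) := by
  unfold PySem.Int.mod; rw [Int.fmod_eq_emod]; simp

-- the pair-gap sum B computes, as a function of the digit-character list
def pvGaps (s : List Char) : Int :=
  ((s.zip s.tail).map (fun p => max 0 ((p.2.toNat : Int) - (p.1.toNat : Int) - 1))).sum

theorem toDigitsCore_acc (fuel : Nat) : ∀ (n : Nat) (ds : List Char),
    Nat.toDigitsCore 10 fuel n ds = Nat.toDigitsCore 10 fuel n [] ++ ds := by
  induction fuel with
  | zero => intro n ds; simp [Nat.toDigitsCore]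
  | succ f ih =>
    intro n ds
    simp only [Nat.toDigitsCore]
    by_cases h : n / 10 = 0
    · simp [h]
    · simp only [h, if_false]
      rw [ih (n / 10) ((n % 10).digitChar :: ds), ih (n / 10) [(n % 10).digitChar]]
      simp

theorem toDigitsCore_fuel (n : Nat) : ∀ (f1 f2 : Nat), n < f1 → n < f2 →
    Nat.toDigitsCore 10 f1 n [] = Nat.toDigitsCore 10 f2 n [] := by
  induction n using Nat.strong_induction_on with
  | _ n ih =>
    intro f1 f2 h1 h2
    obtain ⟨g1, rfl⟩ := Nat.exists_eq_succ_of_ne_zero (by omega : f1 ≠ 0)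
    obtain ⟨g2, rfl⟩ := Nat.exists_eq_succ_of_ne_zero (by omega : f2 ≠ 0)
    simp only [Nat.toDigitsCore]
    by_cases h : n / 10 = 0
    · simp [h]
    · simp only [h, if_false]
      have hlt : n / 10 < n := Nat.div_lt_self (by omega) (by omega)
      rw [toDigitsCore_acc, toDigitsCore_acc g2,
        ih (n / 10) hlt g1 g2 (by omega) (by omega)]

theorem toDigits_small {m : Nat} (h : m < 10) : Nat.toDigits 10 m = [Nat.digitChar m] := by
  unfold Nat.toDigits
  simp only [Nat.toDigitsCore]
  have h0 : m / 10 = 0 := Nat.div_eq_of_lt h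
  simp [h0, Nat.mod_eq_of_lt h]

theorem toDigits_step {m : Nat} (h : 10 ≤ m) :
    Nat.toDigits 10 m = Nat.toDigits 10 (m / 10) ++ [Nat.digitChar (m % 10)] := by
  unfold Nat.toDigits
  conv_lhs => rw [show m + 1 = (m) + 1 from rfl]
  simp only [Nat.toDigitsCore]
  have h0 : m / 10 ≠ 0 := by
    intro hc; have := Nat.div_eq_of_lt (show m < 10 by omega); omega
  simp only [h0, if_false]
  rw [toDigitsCore_acc]
  congr 1
  exact toDigitsCore_fuel (m / 10) m (m / 10 + 1)
    (Nat.div_lt_self (by omega) (by omega)) (Nat.lt_succ_self _)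

theorem toDigits_getLast? (m : Nat) :
    (Nat.toDigits 10 m).getLast? = some (Nat.digitChar (m % 10)) := by
  by_cases h : m < 10
  · rw [toDigits_small h, Nat.mod_eq_of_lt h]; rfl
  · rw [toDigits_step (by omega)]; simp

theorem digitChar_toNat {d : Nat} (h : d < 10) : (Nat.digitChar d).toNat = d + 48 := by
  interval_cases d <;> rfl

theorem zip_tail_append : ∀ (cs : List Char) (x : Char), cs.getLast? = some x → ∀ (d : Char),
    (cs ++ [d]).zip (cs ++ [d]).tail = cs.zip cs.tail ++ [(x, d)]
  | [], x, h, d => by simp at h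
  | [a], x, h, d => by simp_all
  | a :: b :: t, x, h, d => by
    have ih := zip_tail_append (b :: t) x (by simpa using h) d
    simpa using ih

theorem pvGaps_append {cs : List Char} {x : Char} (h : cs.getLast? = some x) (d : Char) :
    pvGaps (cs ++ [d]) = pvGaps cs + max 0 ((d.toNat : Int) - (x.toNat : Int) - 1) := by
  unfold pvGaps
  rw [zip_tail_append cs x h d]
  simp

-- port A on a natural number ≥ 10 equals the pair-gap sum of its decimal digits
theorem missing_digits_nat (m : Nat) (hm : 10 ≤ m) :
    missing_digits (m : Int) = pvGaps (Nat.toDigits 10 m) := by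
  induction m using Nat.strong_induction_on with
  | _ m ih =>
    rw [missing_digits]
    have hnot : ¬ ((m : Int) < 10) := by exact_mod_cast by omega
    simp only [hnot, if_false, pv_fdiv_coe, pv_fmod_coe]
    have hd1 : m % 10 < 10 := Nat.mod_lt _ (by omega)
    have hd2 : m / 10 % 10 < 10 := Nat.mod_lt _ (by omega)
    rw [toDigits_step hm,
      pvGaps_append (toDigits_getLast? (m / 10)) (Nat.digitChar (m % 10)),
      digitChar_toNat hd1, digitChar_toNat hd2]
    have hgoal : missing_digits ((m / 10 : Nat) : Int) = pvGaps (Nat.toDigits 10 (m / 10)) := by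
      by_cases hs : m / 10 < 10
      · have hrec : missing_digits ((m / 10 : Nat) : Int) = 0 := by
          rw [missing_digits]; rw [if_pos (by exact_mod_cast hs)]
        rw [hrec, toDigits_small hs]; rfl
      · exact ih (m / 10) (Nat.div_lt_self (by omega) (by omega)) (by omega)
    rw [hgoal]
    have e1 : ((m % 10 + 48 : Nat) : Int) - ((m / 10 % 10 + 48 : Nat) : Int) - 1
        = ((m % 10 : Nat) : Int) - ((m / 10 % 10 : Nat) : Int) - 1 := by push_cast; ring
    rw [e1]
    split_ifs with hb
    · have : max 0 (((m % 10 : Nat) : Int) - ((m / 10 % 10 : Nat) : Int) - 1) = 0 := by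
        rw [max_eq_left]; omega
      omega
    · have : max 0 (((m % 10 : Nat) : Int) - ((m / 10 % 10 : Nat) : Int) - 1)
          = ((m % 10 : Nat) : Int) - ((m / 10 % 10 : Nat) : Int) - 1 := by
        rw [max_eq_right]; omega
      omega

-- ===== VERDICT (by name: the statement is the Claim_ definition above) =====
theorem missing_digits_spec : Claim_equal_missing_digits := by
  intro n _
  unfold Spec_missing_digits missing_digits_alt
  by_cases h : n < 10
  · rw [missing_digits]; simp [h]
  · simp only [h, if_false]
    obtain ⟨m, rfl⟩ := Int.eq_ofNat_of_zero_le (show (0:Int) ≤ n by omega)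
    have hm : 10 ≤ m := by omega
    have ht : PySem.Int.toChars (m : Int) = Nat.toDigits 10 m := by
      unfold PySem.Int.toChars
      rw [if_neg (by omega)]
      simp
    rw [missing_digits_nat m hm, ht, PySem.Chars.slice, PySem.List.slice_from_one]
    rfl
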